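-- pv_equiv track=rewrite | github.com/Esmaeli/m3ulg | hotrun.py | sort_groups
-- ===== SOURCE A (Python) =====
-- from typing import List, Optional, Dict, Any, Tuple
--
-- def sort_groups(group_names: List[str]) -> List[str]:
--     """
--     Sort groups based on specific priority rules:
--     1. First priority (exact order): iran -> persian -> ir (specific)
--     2. Second priority (exact order): bein -> sport -> spor -> canal+ -> dazn -> paramount
--     3. All other groups alphabetically.
--     Args:
--         group_names: List of group names to sort
--     Returns:
--         Sorted list of group names
--     """
--     # Normalize group names for case-insensitive comparison, keeping original casing
--     # Handle potential non-string group names gracefully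
--     normalized_map = {str(name).lower(): str(name) for name in group_names if isinstance(name, (str, bytes, int, float))}
--     lower_groups_unique = list(normalized_map.keys())
--
--     priority1_lower = []
--     priority2_lower = []
--     processed_lower = set()
--
--     # Define search terms and their conditions
--     p1_terms = [('iran', lambda g: 'iran' in g),
--                 ('persian', lambda g: 'persian' in g),
--                 ('ir', lambda g: 'ir' in g and 'iraq' not in g and 'ireland' not in g)]
--
--     p2_terms = [('bein', lambda g: 'bein' in g),
--                 ('sport', lambda g: 'sport' in g),
--                 ('spor', lambda g: 'spor' in g),
--                 ('canal+', lambda g: 'canal+' in g),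
--                 ('dazn', lambda g: 'dazn' in g),
--                 ('paramount', lambda g: 'paramount' in g)]
--
--     # Populate Priority 1
--     for _, condition in p1_terms:
--         for group_lower in list(lower_groups_unique): # Iterate over a copy
--             if condition(group_lower) and group_lower not in processed_lower:
--                 priority1_lower.append(group_lower)
--                 processed_lower.add(group_lower)
--
--     # Populate Priority 2
--     for _, condition in p2_terms:
--         for group_lower in list(lower_groups_unique): # Iterate over a copy
--             if condition(group_lower) and group_lower not in processed_lower:
--                 priority2_lower.append(group_lower)
--                 processed_lower.add(group_lower)
--
--     # Other groups (sorted alphabetically for consistency)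
--     other_groups_lower = sorted([
--         g for g in lower_groups_unique if g not in processed_lower
--     ])
--
--     # Map back to original casing using the dictionary
--     priority1_original = [normalized_map[g] for g in priority1_lower]
--     priority2_original = [normalized_map[g] for g in priority2_lower]
--     other_groups_original = [normalized_map[g] for g in other_groups_lower]
--
--     return priority1_original + priority2_original + other_groups_original
-- ===== SOURCE B (Python) =====
-- def sort_groups(group_names):
--     terms = [
--         lambda g: 'iran' in g,
--         lambda g: 'persian' in g,
--         lambda g: 'ir' in g and 'iraq' not in g and 'ireland' not in g,
--         lambda g: 'bein' in g,
--         lambda g: 'sport' in g,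
--         lambda g: 'spor' in g,
--         lambda g: 'canal+' in g,
--         lambda g: 'dazn' in g,
--         lambda g: 'paramount' in g,
--     ]
--     normalized_map = {}
--     for name in group_names:
--         if isinstance(name, (str, bytes, int, float)):
--             s = str(name)
--             normalized_map[s.lower()] = s
--
--     def key(g):
--         for i, cond in enumerate(terms):
--             if cond(g):
--                 return (i, '')
--         return (9, g)
--
--     return [normalized_map[g] for g in sorted(normalized_map, key=key)]
-- ===== Notes on version B (the rewrite author's own statement) =====
-- stated objective: simpler
-- what changed: B replaces A's nine sequential bucket-populating scans with a shared processed-set plus a separate alphabetical sort by a single stable keyed sort of the deduplicated lowercase names, keyed by (first matching priority-term index, '') for priority groups and (9, name) for the rest.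
import Mathlib
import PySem

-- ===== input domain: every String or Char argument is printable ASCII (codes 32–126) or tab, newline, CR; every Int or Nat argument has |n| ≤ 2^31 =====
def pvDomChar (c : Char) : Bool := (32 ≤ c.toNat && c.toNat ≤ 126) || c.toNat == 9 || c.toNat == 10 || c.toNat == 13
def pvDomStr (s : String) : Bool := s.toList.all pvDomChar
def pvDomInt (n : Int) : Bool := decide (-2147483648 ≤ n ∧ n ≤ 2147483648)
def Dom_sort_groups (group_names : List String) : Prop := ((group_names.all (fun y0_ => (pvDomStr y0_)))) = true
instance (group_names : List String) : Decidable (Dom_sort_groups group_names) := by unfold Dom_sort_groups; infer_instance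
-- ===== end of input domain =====

-- B replaces A's nine bucket-populating scans plus a separate alphabetical sort by ONE stable keyed
-- sort of the deduplicated lowercase groups (key = first matching priority term, or alphabetical for
-- the rest); objective: simpler.

-- ===== PORT A =====
-- the nine search-term conditions (shared vocabulary of both programs)
def sgIran (g : String) : Bool := PySem.Str.isIn "iran" g
def sgPersian (g : String) : Bool := PySem.Str.isIn "persian" g
def sgIr (g : String) : Bool := PySem.Str.isIn "ir" g && !PySem.Str.isIn "iraq" g && !PySem.Str.isIn "ireland" g
def sgBein (g : String) : Bool := PySem.Str.isIn "bein" g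
def sgSport (g : String) : Bool := PySem.Str.isIn "sport" g
def sgSpor (g : String) : Bool := PySem.Str.isIn "spor" g
def sgCanal (g : String) : Bool := PySem.Str.isIn "canal+" g
def sgDazn (g : String) : Bool := PySem.Str.isIn "dazn" g
def sgParamount (g : String) : Bool := PySem.Str.isIn "paramount" g

def sgCondsP1 : List (String → Bool) := [sgIran, sgPersian, sgIr]
def sgCondsP2 : List (String → Bool) := [sgBein, sgSport, sgSpor, sgCanal, sgDazn, sgParamount]

-- {str(name).lower(): str(name) for name in group_names}: every element is a str here, so the
-- isinstance filter always passes and str(name) is name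
def sgMap (group_names : List String) : PySem.Dict String String :=
  group_names.foldl (fun d name => d.insert (PySem.Str.lower name) name) PySem.Dict.empty

def sort_groups (group_names : List String) : List String :=
  let normalized_map := sgMap group_names
  let lower_groups_unique := normalized_map.keys
  -- Populate Priority 1 (priority1_lower, processed_lower)
  let st1 := sgCondsP1.foldl
    (fun st cond => lower_groups_unique.foldl
      (fun st g => if cond g && !(st.2.contains g) then (st.1 ++ [g], st.2.add g) else st) st)
    (([] : List String), (PySem.Set.empty : PySem.Set String))
  -- Populate Priority 2 (priority2_lower, processed_lower carried over)
  let st2 := sgCondsP2.foldl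
    (fun st cond => lower_groups_unique.foldl
      (fun st g => if cond g && !(st.2.contains g) then (st.1 ++ [g], st.2.add g) else st) st)
    (([] : List String), st1.2)
  let other_groups_lower := PySem.List.sorted (lower_groups_unique.filter (fun g => !(st2.2.contains g))) (fun x => x) false
  st1.1.map (fun g => normalized_map.getD g g)
    ++ st2.1.map (fun g => normalized_map.getD g g)
    ++ other_groups_lower.map (fun g => normalized_map.getD g g)

-- ===== PORT B =====
def sgConds : List (String → Bool) :=
  [sgIran, sgPersian, sgIr, sgBein, sgSport, sgSpor, sgCanal, sgDazn, sgParamount]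

-- 'for i, cond in enumerate(terms): if cond(g): return (i, '')' / 'return (9, g)'
def sgFind : List (String → Bool) → String → Option Nat
  | [], _ => none
  | c :: cs, g => if c g then some 0 else (sgFind cs g).map (· + 1)

def sgKey (g : String) : Int × String :=
  match sgFind sgConds g with
  | some i => ((i : Int), "")
  | none => (9, g)

def sort_groups_alt (group_names : List String) : List String :=
  let normalized_map := sgMap group_names
  (PySem.List.sorted2 normalized_map.keys (fun g => (sgKey g).1) (fun g => (sgKey g).2) false).map
    (fun g => normalized_map.getD g g)

-- ===== PRECONDITION & SPEC =====
def Spec_sort_groups (group_names : List String) (out : List String) : Prop := out = sort_groups_alt group_names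
instance (group_names : List String) (out : List String) : Decidable (Spec_sort_groups group_names out) := by unfold Spec_sort_groups; infer_instance

-- ===== CLAIM (what is proved, stated in full; the proofs are below) =====
def Claim_equal_sort_groups : Prop := ∀ (group_names : List String), Dom_sort_groups group_names → Spec_sort_groups group_names (sort_groups group_names)

-- ===== LEMMAS AND PROOFS =====

-- proof-only vocabulary
def sgMatched (cs : List (String → Bool)) (g : String) : Bool := cs.any (fun c => c g)

def sgF (j : Nat) (xs : List String) : List String :=
  xs.filter (fun g => sgFind sgConds g == some j)

def sgO (xs : List String) : List String :=
  PySem.List.sorted (xs.filter (fun g => (sgFind sgConds g).isNone)) (fun x => x) false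

def sgCanon (xs : List String) : List String :=
  (List.range 9).flatMap (fun j => sgF j xs) ++ sgO xs

def sgBuckets : List (String → Bool) → List String → (String → Bool) → List String
  | [], _, _ => []
  | c :: cs, uniq, p => uniq.filter (fun g => c g && !(p g)) ++ sgBuckets cs uniq (fun g => p g || c g)

def sgBefore (a b : String) : Bool :=
  decide ((sgKey a).1 < (sgKey b).1) || (!decide ((sgKey b).1 < (sgKey a).1) && decide ((sgKey a).2 < (sgKey b).2))

lemma sgFind_lt {cs : List (String → Bool)} {g : String} {i : Nat} (h : sgFind cs g = some i) : i < cs.length := by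
  induction cs generalizing i with
  | nil => simp [sgFind] at h
  | cons c cs ih =>
    simp only [sgFind] at h
    cases hc : c g with
    | true => rw [hc] at h; simp at h; subst h; simp
    | false =>
      rw [hc] at h
      simp only [Bool.false_eq_true, if_false, Option.map_eq_some_iff] at h
      obtain ⟨j, hj, rfl⟩ := h
      have := ih hj
      simp only [List.length_cons]; omega

lemma sgFind_eq_some_iff (pre : List (String → Bool)) (c : String → Bool) (cs' : List (String → Bool)) (g : String) :
    sgFind (pre ++ c :: cs') g = some pre.length ↔ (c g = true ∧ ∀ d ∈ pre, d g = false) := by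
  induction pre with
  | nil =>
    simp only [List.nil_append, sgFind, List.length_nil]
    cases hc : c g with
    | true => simp
    | false =>
      simp only [Bool.false_eq_true, if_false, Option.map_eq_some_iff]
      constructor
      · rintro ⟨j, -, hj⟩; omega
      · rintro ⟨h, -⟩; exact absurd h (by simp)
  | cons d pre ih =>
    simp only [List.cons_append, sgFind, List.length_cons]
    cases hd : d g with
    | true =>
      simp only [if_true]
      constructor
      · intro h; simp at h
      · rintro ⟨-, hall⟩
        have := hall d (by simp)
        rw [hd] at this; simp at this
    | false =>
      simp only [Bool.false_eq_true, if_false, Option.map_eq_some_iff]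
      constructor
      · rintro ⟨j, hj, hjj⟩
        have hje : j = pre.length := by omega
        subst hje
        obtain ⟨h1, h2⟩ := ih.mp hj
        refine ⟨h1, ?_⟩
        rintro e he
        rcases List.mem_cons.mp he with rfl | he'
        · exact hd
        · exact h2 e he'
      · rintro ⟨h1, h2⟩
        exact ⟨pre.length, ih.mpr ⟨h1, fun e he => h2 e (List.mem_cons_of_mem _ he)⟩, rfl⟩

lemma sgFind_eq_none_iff (cs : List (String → Bool)) (g : String) :
    sgFind cs g = none ↔ ∀ c ∈ cs, c g = false := by
  induction cs with
  | nil => simp [sgFind]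
  | cons c cs ih =>
    by_cases hc : c g
    · simp [sgFind, hc]
    · simp [sgFind, hc, ih]

lemma sgKey_some {g : String} {i : Nat} (h : sgFind sgConds g = some i) : sgKey g = ((i : Int), "") := by
  simp [sgKey, h]

lemma sgKey_none {g : String} (h : sgFind sgConds g = none) : sgKey g = (9, g) := by
  simp [sgKey, h]

lemma insertBy_split {α : Type} (before : α → α → Bool) (x : α) (l1 l2 : List α)
    (h1 : ∀ y ∈ l1, before x y = false) (h2 : ∀ y ∈ l2, before x y = true) :
    PySem.List.insertBy before x (l1 ++ l2) = l1 ++ x :: l2 := by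
  induction l1 with
  | nil =>
    cases l2 with
    | nil => rfl
    | cons y ys => simp [PySem.List.insertBy, h2 y (by simp)]
  | cons y l1 ih =>
    simp only [List.cons_append, PySem.List.insertBy, h1 y (by simp)]
    simp only [Bool.false_eq_true, if_false, List.cons.injEq, true_and]
    exact ih (fun z hz => h1 z (by simp [hz]))

lemma insertBy_congr {α : Type} (f f' : α → α → Bool) (x : α) (l : List α)
    (h : ∀ y ∈ l, f x y = f' x y) :
    PySem.List.insertBy f x l = PySem.List.insertBy f' x l := by
  induction l with
  | nil => rfl
  | cons y ys ih =>
    simp only [PySem.List.insertBy, h y (by simp)]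
    split
    · rfl
    · rw [ih (fun z hz => h z (by simp [hz]))]

lemma sorted2_eq_foldl (xs : List String) :
    PySem.List.sorted2 xs (fun g => (sgKey g).1) (fun g => (sgKey g).2) false
      = xs.foldl (fun acc x => PySem.List.insertBy sgBefore x acc) [] := by
  rfl

lemma insertBy_append {α : Type} (before : α → α → Bool) (x : α) (l1 l2 : List α)
    (h1 : ∀ y ∈ l1, before x y = false) :
    PySem.List.insertBy before x (l1 ++ l2) = l1 ++ PySem.List.insertBy before x l2 := by
  induction l1 with
  | nil => rfl
  | cons y l1 ih =>
    simp only [List.cons_append, PySem.List.insertBy, h1 y (by simp), Bool.false_eq_true, if_false,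
      List.cons.injEq, true_and]
    exact ih (fun z hz => h1 z (by simp [hz]))

lemma sgConds_length : sgConds.length = 9 := by simp [sgConds]

lemma mem_sgF {g : String} {j : Nat} {xs : List String} (h : g ∈ sgF j xs) :
    sgFind sgConds g = some j := by
  have := (List.mem_filter.mp h).2
  exact beq_iff_eq.mp this

lemma mem_sgO {g : String} {xs : List String} (h : g ∈ sgO xs) :
    sgFind sgConds g = none := by
  have hm : g ∈ xs.filter (fun g => (sgFind sgConds g).isNone) := by
    have := (PySem.List.mem_sorted (xs := xs.filter (fun g => (sgFind sgConds g).isNone))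
      (key := fun x => x) (rev := false) (x := g)).mp h
    exact this
  have := (List.mem_filter.mp hm).2
  exact Option.isNone_iff_eq_none.mp this

lemma sgBefore_some_some {x y : String} {i j : Nat}
    (hx : sgFind sgConds x = some i) (hy : sgFind sgConds y = some j) :
    sgBefore x y = decide (i < j) := by
  simp only [sgBefore, sgKey_some hx, sgKey_some hy]
  have he : decide (("" : String) < "") = false := decide_eq_false (lt_irrefl _)
  rw [he]
  simp [Nat.cast_lt]

lemma sgBefore_some_none {x y : String} {i : Nat}
    (hx : sgFind sgConds x = some i) (hy : sgFind sgConds y = none) (hi : i < 9) :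
    sgBefore x y = true := by
  simp only [sgBefore, sgKey_some hx, sgKey_none hy]
  have : ((i : Int) < 9) := by exact_mod_cast hi
  simp [this]

lemma sgBefore_none_some {x y : String} {j : Nat}
    (hx : sgFind sgConds x = none) (hy : sgFind sgConds y = some j) (hj : j < 9) :
    sgBefore x y = false := by
  simp only [sgBefore, sgKey_none hx, sgKey_some hy]
  have h1 : ¬ ((9 : Int) < (j : Int)) := by
    have : ((j : Int) < 9) := by exact_mod_cast hj
    omega
  have h2 : ((j : Int) < 9) := by exact_mod_cast hj
  simp [h1, h2]

lemma sgBefore_none_none {x y : String}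
    (hx : sgFind sgConds x = none) (hy : sgFind sgConds y = none) :
    sgBefore x y = decide (x < y) := by
  simp only [sgBefore, sgKey_none hx, sgKey_none hy]
  simp

lemma sorted2_canon (xs : List String) :
    PySem.List.sorted2 xs (fun g => (sgKey g).1) (fun g => (sgKey g).2) false = sgCanon xs := by
  induction xs using List.reverseRecOn with
  | nil => rfl
  | append_singleton xs x ih =>
    rw [sorted2_eq_foldl, List.foldl_append, ← sorted2_eq_foldl, ih]
    simp only [List.foldl_cons, List.foldl_nil]
    cases hfx : sgFind sgConds x with
    | some i =>
      have hi9 : i < 9 := by have := sgFind_lt hfx; rwa [sgConds_length] at this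
      have hr : List.range 9 = List.range (i+1) ++ (List.range (8-i)).map (fun t => (i+1) + t) := by
        rw [← List.range_add]; congr 1; omega
      -- the two halves of the bucket region, split after x's bucket
      have hsplit : sgCanon xs
          = ((List.range (i+1)).flatMap (fun j => sgF j xs))
            ++ (((List.range (8-i)).map (fun t => (i+1) + t)).flatMap (fun j => sgF j xs) ++ sgO xs) := by
        simp only [sgCanon, hr, List.flatMap_append, List.append_assoc]
      rw [hsplit, insertBy_split]
      · -- canon (xs ++ [x]) is the same list with x at the end of bucket i
        have hFne : ∀ j : Nat, j ≠ i → sgF j (xs ++ [x]) = sgF j xs := by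
          intro j hj
          simp only [sgF, List.filter_append, List.filter_cons, List.filter_nil]
          have : (sgFind sgConds x == some j) = false := by
            rw [hfx]; simp; omega
          simp [this]
        have hFi : sgF i (xs ++ [x]) = sgF i xs ++ [x] := by
          simp only [sgF, List.filter_append, List.filter_cons, List.filter_nil]
          rw [hfx]
          simp
        have hO : sgO (xs ++ [x]) = sgO xs := by
          simp only [sgO, List.filter_append, List.filter_cons, List.filter_nil]
          rw [hfx]
          simp
        simp only [sgCanon, hr, List.flatMap_append, hO]
        have hpart2 : ((List.range (8-i)).map (fun t => (i+1) + t)).flatMap (fun j => sgF j (xs ++ [x]))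
            = ((List.range (8-i)).map (fun t => (i+1) + t)).flatMap (fun j => sgF j xs) := by
          apply List.flatMap_congr
          intro j hjm
          rcases List.mem_map.mp hjm with ⟨t, _, rfl⟩
          exact hFne _ (by omega)
        have hpart1 : (List.range (i+1)).flatMap (fun j => sgF j (xs ++ [x]))
            = (List.range (i+1)).flatMap (fun j => sgF j xs) ++ [x] := by
          rw [List.range_succ, List.flatMap_append, List.flatMap_append]
          have hhead : (List.range i).flatMap (fun j => sgF j (xs ++ [x]))
              = (List.range i).flatMap (fun j => sgF j xs) := by
            apply List.flatMap_congr
            intro j hjm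
            exact hFne _ (by have := List.mem_range.mp hjm; omega)
          rw [hhead]
          simp [hFi]
        rw [hpart2, hpart1]
        simp [List.append_assoc]
      · -- everything before x's insertion point does not come after x
        intro y hy
        rcases List.mem_flatMap.mp hy with ⟨j, hjm, hyF⟩
        have hj : j < i + 1 := List.mem_range.mp hjm
        rw [sgBefore_some_some hfx (mem_sgF hyF)]
        simp; omega
      · -- everything after x's insertion point comes strictly after x
        intro y hy
        rcases List.mem_append.mp hy with hyB | hyO
        · rcases List.mem_flatMap.mp hyB with ⟨j, hjm, hyF⟩
          rcases List.mem_map.mp hjm with ⟨t, _, rfl⟩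
          rw [sgBefore_some_some hfx (mem_sgF hyF)]
          simp; omega
        · exact sgBefore_some_none hfx (mem_sgO hyO) hi9
    | none =>
      have hFall : ∀ j : Nat, sgF j (xs ++ [x]) = sgF j xs := by
        intro j
        simp only [sgF, List.filter_append, List.filter_cons, List.filter_nil]
        rw [hfx]
        simp
      have hO : sgO (xs ++ [x])
          = PySem.List.insertBy (fun a b => decide (a < b)) x (sgO xs) := by
        simp only [sgO, List.filter_append, List.filter_cons, List.filter_nil]
        rw [hfx]
        simp only [Option.isNone_none, if_true]
        rw [PySem.List.sorted_eq_foldl_insertBy, PySem.List.sorted_eq_foldl_insertBy,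
          List.foldl_append]
        simp
      simp only [sgCanon, hFall, hO]
      rw [insertBy_append]
      · congr 1
        apply insertBy_congr
        intro y hy
        exact sgBefore_none_none hfx (mem_sgO hy)
      · intro y hy
        rcases List.mem_flatMap.mp hy with ⟨j, hjm, hyF⟩
        exact sgBefore_none_some hfx (mem_sgF hyF) (List.mem_range.mp hjm)

lemma set_contains_add (s : PySem.Set String) (x y : String) :
    (s.add x).contains y = (s.contains y || (y == x)) := by
  simp only [PySem.Set.add]
  split
  case isTrue hx =>
    by_cases hyx : y = x
    · subst hyx; simp only [beq_self_eq_true, Bool.or_true]; exact hx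
    · simp [beq_eq_false_iff_ne.mpr hyx]
  case isFalse hx =>
    by_cases hyx : y = x
    · subst hyx; simp [PySem.Set.contains, List.contains_eq_mem]
    · simp [PySem.Set.contains, List.contains_eq_mem, hyx, beq_eq_false_iff_ne.mpr hyx]

lemma scan_inner (c : String → Bool) (uniq : List String) (hnd : uniq.Nodup) :
    ∀ (acc : List String) (P : PySem.Set String),
      (uniq.foldl (fun st g => if c g && !(st.2.contains g) then (st.1 ++ [g], st.2.add g) else st)
        ((acc, P) : List String × PySem.Set String)).1
        = acc ++ uniq.filter (fun g => c g && !(P.contains g))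
      ∧ ∀ x, (uniq.foldl (fun st g => if c g && !(st.2.contains g) then (st.1 ++ [g], st.2.add g) else st)
        ((acc, P) : List String × PySem.Set String)).2.contains x
          = (P.contains x || (c x && uniq.contains x)) := by
  induction uniq with
  | nil => intro acc P; simp
  | cons g rest ih =>
    intro acc P
    obtain ⟨hg, hrest⟩ := List.nodup_cons.mp hnd
    have ih' := ih hrest
    simp only [List.foldl_cons]
    by_cases hc : (c g && !(P.contains g)) = true
    · simp only [hc, if_true]
      obtain ⟨ih1, ih2⟩ := ih' (acc ++ [g]) (P.add g)
      constructor
      · rw [ih1]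
        have hfc : rest.filter (fun x => c x && !((P.add g).contains x))
            = rest.filter (fun x => c x && !(P.contains x)) := by
          apply List.filter_congr
          intro x hx
          have hxg : x ≠ g := fun h => hg (h ▸ hx)
          rw [set_contains_add, beq_eq_false_iff_ne.mpr hxg, Bool.or_false]
        rw [hfc]
        simp only [List.filter_cons, hc, if_true]
        simp
      · intro x
        rw [ih2 x, set_contains_add]
        by_cases hxg : x = g
        · subst hxg
          simp only [beq_self_eq_true, Bool.or_true, Bool.true_or, List.contains_cons,
            beq_self_eq_true, Bool.true_or]
          have hx : c x = true := by
            have := hc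
            simp only [Bool.and_eq_true] at this
            exact this.1
          simp [hx]
        · rw [beq_eq_false_iff_ne.mpr hxg, Bool.or_false]
          simp only [List.contains_cons, beq_eq_false_iff_ne.mpr hxg, Bool.false_or]
    · have hcf : (c g && !(P.contains g)) = false := by simpa using hc
      simp only [hcf, Bool.false_eq_true, if_false]
      obtain ⟨ih1, ih2⟩ := ih' acc P
      constructor
      · rw [ih1]
        simp only [List.filter_cons, hcf, Bool.false_eq_true, if_false]
      · intro x
        rw [ih2 x]
        by_cases hxg : x = g
        · subst hxg
          simp only [List.contains_cons, beq_self_eq_true, Bool.true_or, Bool.and_true]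
          cases hcx : c x with
          | false => simp
          | true =>
            have hpx : P.contains x = true := by
              rw [hcx] at hcf; simpa using hcf
            rw [hpx]; simp
        · simp only [List.contains_cons, beq_eq_false_iff_ne.mpr hxg, Bool.false_or]

lemma scan_outer (uniq : List String) (hnd : uniq.Nodup) :
    ∀ (cs : List (String → Bool)) (acc : List String) (P : PySem.Set String) (p : String → Bool),
      (∀ g ∈ uniq, P.contains g = p g) →
      (cs.foldl (fun st cond => uniq.foldl
          (fun st g => if cond g && !(st.2.contains g) then (st.1 ++ [g], st.2.add g) else st) st)
        ((acc, P) : List String × PySem.Set String)).1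
        = acc ++ sgBuckets cs uniq p
      ∧ ∀ g ∈ uniq, (cs.foldl (fun st cond => uniq.foldl
          (fun st g => if cond g && !(st.2.contains g) then (st.1 ++ [g], st.2.add g) else st) st)
        ((acc, P) : List String × PySem.Set String)).2.contains g
          = (p g || sgMatched cs g) := by
  intro cs
  induction cs with
  | nil =>
    intro acc P p hp
    refine ⟨by simp [sgBuckets], ?_⟩
    intro g hg
    simp only [sgMatched, List.any_nil, Bool.or_false]
    exact hp g hg
  | cons c cs ih =>
    intro acc P p hp
    simp only [List.foldl_cons]
    obtain ⟨in1, in2⟩ := scan_inner c uniq hnd acc P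
    have hfilt : uniq.filter (fun g => c g && !(P.contains g))
        = uniq.filter (fun g => c g && !(p g)) :=
      List.filter_congr (fun x hx => by rw [hp x hx])
    have hp' : ∀ g ∈ uniq,
        (uniq.foldl (fun st g => if c g && !(st.2.contains g) then (st.1 ++ [g], st.2.add g) else st)
          ((acc, P) : List String × PySem.Set String)).2.contains g = (p g || c g) := by
      intro g hg
      rw [in2 g, hp g hg, List.contains_eq_mem, decide_eq_true hg, Bool.and_true]
    have hpair :
        (uniq.foldl (fun st g => if c g && !(st.2.contains g) then (st.1 ++ [g], st.2.add g) else st)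
          ((acc, P) : List String × PySem.Set String))
        = ((uniq.foldl (fun st g => if c g && !(st.2.contains g) then (st.1 ++ [g], st.2.add g) else st)
          ((acc, P) : List String × PySem.Set String)).1,
          (uniq.foldl (fun st g => if c g && !(st.2.contains g) then (st.1 ++ [g], st.2.add g) else st)
          ((acc, P) : List String × PySem.Set String)).2) := rfl
    rw [hpair, in1, hfilt]
    obtain ⟨o1, o2⟩ := ih (acc ++ uniq.filter (fun g => c g && !(p g))) _ (fun g => p g || c g) hp'
    refine ⟨?_, ?_⟩
    · rw [o1]
      simp [sgBuckets]
    · intro g hg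
      rw [o2 g hg]
      simp [sgMatched, Bool.or_assoc]

lemma sgBuckets_append (cs1 cs2 : List (String → Bool)) (uniq : List String) (p : String → Bool) :
    sgBuckets (cs1 ++ cs2) uniq p
      = sgBuckets cs1 uniq p ++ sgBuckets cs2 uniq (fun g => p g || sgMatched cs1 g) := by
  induction cs1 generalizing p with
  | nil => simp [sgBuckets, sgMatched]
  | cons c cs1 ih =>
    simp only [List.cons_append, sgBuckets, ih, List.append_assoc, List.append_cancel_left_eq]
    congr 1
    funext g
    simp [sgMatched, Bool.or_assoc]

lemma sgBuckets_flatMap (uniq : List String) :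
    ∀ (cs pre : List (String → Bool)), pre ++ cs = sgConds →
      sgBuckets cs uniq (fun g => sgMatched pre g)
        = ((List.range cs.length).map (· + pre.length)).flatMap (fun j => sgF j uniq) := by
  intro cs
  induction cs with
  | nil => intro pre h; simp [sgBuckets]
  | cons c cs ih =>
    intro pre h
    have hfirst : uniq.filter (fun g => c g && !(sgMatched pre g))
        = sgF pre.length uniq := by
      simp only [sgF]
      apply List.filter_congr
      intro g _
      have hiff := sgFind_eq_some_iff pre c cs g
      rw [h] at hiff
      cases hfind : (sgFind sgConds g == some pre.length) with
      | true =>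
        rw [beq_iff_eq] at hfind
        obtain ⟨h1, h2⟩ := hiff.mp hfind
        simp only [h1, Bool.true_and, sgMatched]
        simp only [Bool.not_eq_eq_eq_not, Bool.not_true, List.any_eq_false]
        intro d hd
        simp [h2 d hd]
      | false =>
        rw [beq_eq_false_iff_ne] at hfind
        by_cases hcg : c g = true
        · have hne : ¬ ∀ d ∈ pre, d g = false := fun hall => hfind (hiff.mpr ⟨hcg, hall⟩)
          have hany : sgMatched pre g = true := by
            have hex : ∃ d ∈ pre, d g = true := by
              by_contra hno
              push Not at hno
              exact hne (fun d hd => by simpa using hno d hd)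
            rcases hex with ⟨d, hdp, hdg⟩
            simp only [sgMatched, List.any_eq_true]
            exact ⟨d, hdp, hdg⟩
          simp [hany]
        · simp [Bool.eq_false_iff.mpr hcg]
    have hnext : (fun g => sgMatched pre g || c g) = (fun g => sgMatched (pre ++ [c]) g) := by
      funext g
      simp [sgMatched]
    calc sgBuckets (c :: cs) uniq (fun g => sgMatched pre g)
        = sgF pre.length uniq ++ sgBuckets cs uniq (fun g => sgMatched (pre ++ [c]) g) := by
          simp only [sgBuckets, hfirst, hnext]
      _ = sgF pre.length uniq
            ++ ((List.range cs.length).map (· + (pre ++ [c]).length)).flatMap (fun j => sgF j uniq) := by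
          rw [ih (pre ++ [c]) (by simpa using h)]
      _ = ((List.range (c :: cs).length).map (· + pre.length)).flatMap (fun j => sgF j uniq) := by
          have hm : (List.range (c :: cs).length).map (· + pre.length)
              = pre.length :: (List.range cs.length).map (· + (pre ++ [c]).length) := by
            simp only [List.length_cons, List.range_succ_eq_map, List.map_cons, Nat.zero_add,
              List.map_map]
            congr 1
            apply List.map_congr_left
            intro j _
            simp only [Function.comp, List.length_append, List.length_cons, List.length_nil]
            omega
          rw [hm, List.flatMap_cons]

lemma foldl_insert_keys_nodup (l : List String) :
    ∀ (d : PySem.Dict String String), d.keys.Nodup →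
      (l.foldl (fun d name => d.insert (PySem.Str.lower name) name) d).keys.Nodup := by
  induction l with
  | nil => intro d hd; exact hd
  | cons x xs ih =>
    intro d hd
    exact ih _ (PySem.Dict.nodup_keys_insert _ _ _ hd)

lemma sgMap_keys_nodup (group_names : List String) : (sgMap group_names).keys.Nodup := by
  exact foldl_insert_keys_nodup group_names _ (PySem.Dict.nodup_keys_empty)

-- ===== VERDICT (by name: the statement is the Claim_ definition above) =====
lemma sgMatched_nil_eq : (fun g : String => sgMatched [] g) = (fun _ => false) := by
  funext g; rfl

lemma sgCondsP1_append_P2 : sgCondsP1 ++ sgCondsP2 = sgConds := rfl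

theorem sort_groups_spec : Claim_equal_sort_groups := by
  intro gn _
  unfold Spec_sort_groups
  simp only [sort_groups, sort_groups_alt]
  have hnd := sgMap_keys_nodup gn
  have hP0 : ∀ g ∈ (sgMap gn).keys, (PySem.Set.empty : PySem.Set String).contains g
      = (fun _ : String => false) g := by
    intro g _; rfl
  obtain ⟨o11, o12⟩ := scan_outer (sgMap gn).keys hnd sgCondsP1 [] PySem.Set.empty
    (fun _ => false) hP0
  have hp1 : ∀ g ∈ (sgMap gn).keys,
      (sgCondsP1.foldl (fun st cond => (sgMap gn).keys.foldl
        (fun st g => if cond g && !(st.2.contains g) then (st.1 ++ [g], st.2.add g) else st) st)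
        (([] : List String), (PySem.Set.empty : PySem.Set String))).2.contains g
      = (fun g => sgMatched sgCondsP1 g) g := by
    intro g hg
    rw [o12 g hg]
    simp
  obtain ⟨o21, o22⟩ := scan_outer (sgMap gn).keys hnd sgCondsP2 []
    (sgCondsP1.foldl (fun st cond => (sgMap gn).keys.foldl
      (fun st g => if cond g && !(st.2.contains g) then (st.1 ++ [g], st.2.add g) else st) st)
      (([] : List String), (PySem.Set.empty : PySem.Set String))).2
    (fun g => sgMatched sgCondsP1 g) hp1
  have hother : (sgMap gn).keys.filter (fun g =>
      !((sgCondsP2.foldl (fun st cond => (sgMap gn).keys.foldl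
        (fun st g => if cond g && !(st.2.contains g) then (st.1 ++ [g], st.2.add g) else st) st)
        (([] : List String),
          (sgCondsP1.foldl (fun st cond => (sgMap gn).keys.foldl
            (fun st g => if cond g && !(st.2.contains g) then (st.1 ++ [g], st.2.add g) else st) st)
            (([] : List String), (PySem.Set.empty : PySem.Set String))).2)).2.contains g))
      = (sgMap gn).keys.filter (fun g => (sgFind sgConds g).isNone) := by
    apply List.filter_congr
    intro g hg
    rw [o22 g hg]
    cases hfg : sgFind sgConds g with
    | some j =>
      have : ¬ ∀ c ∈ sgConds, c g = false := by
        intro hall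
        rw [(sgFind_eq_none_iff sgConds g).mpr hall] at hfg
        simp at hfg
      have hany : sgMatched sgConds g = true := by
        simp only [sgMatched, List.any_eq_true]
        by_contra hno
        push Not at hno
        exact this (fun c hc => by simpa using hno c hc)
      have hPP : (sgMatched sgCondsP1 g || sgMatched sgCondsP2 g) = sgMatched sgConds g := by
        simp [sgMatched, ← sgCondsP1_append_P2, List.any_append]
      have : (sgMatched sgCondsP1 g || sgMatched sgCondsP2 g) = true := by
        rw [hPP]; exact hany
      rw [this]
      rfl
    | none =>
      have hall := (sgFind_eq_none_iff sgConds g).mp hfg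
      have h1 : sgMatched sgCondsP1 g = false := by
        simp only [sgMatched, List.any_eq_false]
        intro c hc
        simp [hall c (by rw [← sgCondsP1_append_P2]; exact List.mem_append_left _ hc)]
      have h2 : sgMatched sgCondsP2 g = false := by
        simp only [sgMatched, List.any_eq_false]
        intro c hc
        simp [hall c (by rw [← sgCondsP1_append_P2]; exact List.mem_append_right _ hc)]
      rw [h1, h2]
      rfl
  rw [o11, o21, hother, sorted2_canon]
  have hbuckets : sgBuckets sgCondsP1 (sgMap gn).keys (fun _ => false)
      ++ sgBuckets sgCondsP2 (sgMap gn).keys (fun g => sgMatched sgCondsP1 g)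
      = (List.range 9).flatMap (fun j => sgF j (sgMap gn).keys) := by
    have hb2 : (fun g : String => sgMatched sgCondsP1 g)
        = (fun g : String => (fun _ : String => false) g || sgMatched sgCondsP1 g) := by
      funext g; simp
    rw [hb2, ← sgBuckets_append, sgCondsP1_append_P2]
    have := sgBuckets_flatMap (sgMap gn).keys sgConds [] rfl
    rw [sgMatched_nil_eq] at this
    rw [this, sgConds_length]
    simp
  simp only [List.nil_append, ← List.map_append]
  rw [hbuckets]
  rfl
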